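-- pv_equiv track=rewrite | github.com/MilosCicmanec/KSP | 42_rocnik_2_cast_2_kolo/ls.py | min_partitions
-- ===== SOURCE A (Python) =====
-- from functools import lru_cache
--
-- def min_partitions(s):
--     n = len(s)
--
--     @lru_cache(None)
--     def dfs(start):
--         if start == n:
--             return 0
--         min_parts = float('inf')
--         for end in range(start, n):
--             if end == start or s[start] == s[end]:
--                 min_parts = min(min_parts, 1 + dfs(end + 1))
--         return min_parts
--
--     return dfs(0)
-- ===== SOURCE B (Python) =====
-- def min_partitions(s):
--     # Right-to-left DP: best[c] = min dp-value achievable just after a later occurrence of c.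
--     best = {}
--     dp = 0
--     for c in reversed(s):
--         b = min(best.get(c, dp), dp)
--         best[c] = b
--         dp = 1 + b
--     return dp
-- ===== Notes on version B (the rewrite author's own statement) =====
-- stated objective: faster
-- what changed: Replaced A's memoized top-down recursion (each call scans all later positions for a matching character) by a single right-to-left pass that keeps, per character, the best dp-value reachable just after a later occurrence of that character in a dictionary.
import Mathlib
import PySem

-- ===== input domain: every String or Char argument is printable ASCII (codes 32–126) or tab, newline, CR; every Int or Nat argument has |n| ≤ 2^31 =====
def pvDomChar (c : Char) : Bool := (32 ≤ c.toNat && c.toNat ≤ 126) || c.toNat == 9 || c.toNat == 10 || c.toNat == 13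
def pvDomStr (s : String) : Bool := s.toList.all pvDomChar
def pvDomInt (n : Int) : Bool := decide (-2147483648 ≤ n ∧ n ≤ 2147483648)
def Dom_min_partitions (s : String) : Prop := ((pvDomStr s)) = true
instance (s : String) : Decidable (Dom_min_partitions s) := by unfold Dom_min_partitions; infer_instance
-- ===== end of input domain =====

-- B replaces A's memoized top-down recursion (quadratic loop inside each call) by a single
-- right-to-left pass keeping, per character, the best dp-value after a later occurrence (objective: faster).

-- ===== PORT A =====
-- Port of A's dfs: lru_cache memoizes but does not change the value, so the port is the plain
-- recursion. Python's float('inf') accumulator is modeled as the `none` accumulator of the fold;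
-- the `.getD 0` default is never the value returned on a reachable call (the end = start
-- iteration always sets the accumulator when start < n).
def dfsA (s : List Char) (n : Nat) (start : Nat) : Int :=
  if start = n then 0
  else
    ((List.range' start (n - start)).attach.foldl
      (fun (acc : Option Int) e =>
        if e.1 = start ∨ s[start]? = s[e.1]? then
          some (acc.elim (1 + dfsA s n (e.1 + 1)) (fun m => min m (1 + dfsA s n (e.1 + 1))))
        else acc)
      none).getD 0
termination_by n - start
decreasing_by
  have h := e.2
  rw [List.mem_range'] at h
  omega

def min_partitions (s : String) : Int := dfsA s.toList s.toList.length 0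

-- ===== PORT B =====
def min_partitions_alt (s : String) : Int :=
  (s.toList.reverse.foldl
    (fun (st : PySem.Dict Char Int × Int) c =>
      let b := min (st.1.getD c st.2) st.2
      (st.1.insert c b, 1 + b))
    (PySem.Dict.empty, 0)).2

-- ===== PRECONDITION & SPEC =====
def Spec_min_partitions (s : String) (out : Int) : Prop := out = min_partitions_alt s
instance (s : String) (out : Int) : Decidable (Spec_min_partitions s out) := by unfold Spec_min_partitions; infer_instance

-- ===== CLAIM (what is proved, stated in full; the proofs are below) =====
def Claim_equal_min_partitions : Prop := ∀ (s : String), Dom_min_partitions s → Spec_min_partitions s (min_partitions s)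

-- ===== LEMMAS AND PROOFS =====

-- min of an optional candidate set with a mandatory candidate d
def omin (o : Option Int) (d : Int) : Int := o.elim d (fun m => min m d)

-- selMin c t vs: min over the positions j of t with t[j] = c of vs[j] (none if c ∉ t)
def selMin (c : Char) : List Char → List Int → Option Int
  | x :: t, v :: vs => if x = c then some (omin (selMin c t vs) v) else selMin c t vs
  | _, _ => none

-- dp table of the suffixes: dpTable t = [dp(t), dp(t.tail), …, dp([]) = 0]
def dpTable : List Char → List Int
  | [] => [0]
  | c :: t => (1 + omin (selMin c t (dpTable t).tail) ((dpTable t).headD 0)) :: dpTable t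

def dpAt (cs : List Char) (i : Nat) : Int := (dpTable (cs.drop i)).headD 0

-- A-side fold shapes over index ranges (p = selection predicate, F = recursive dp values)
def Gfold (p : Nat → Prop) [DecidablePred p] (F : Nat → Int) : Nat → Nat → Int → Int
  | _, 0, a => a
  | i, k+1, a => Gfold p F (i+1) k (if p i then min a (1 + F (i+1)) else a)

def Hsel (p : Nat → Prop) [DecidablePred p] (F : Nat → Int) : Nat → Nat → Option Int
  | _, 0 => none
  | i, k+1 =>
    if p i then some (omin (Hsel p F (i+1) k) (1 + F (i+1))) else Hsel p F (i+1) k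

lemma foldl_range'_G (p : Nat → Prop) [DecidablePred p] (F : Nat → Int) :
    ∀ (k i : Nat) (a : Int),
      (List.range' i k).foldl
        (fun (acc : Option Int) e =>
          if p e then
            some (acc.elim (1 + F (e + 1)) (fun m => min m (1 + F (e + 1))))
          else acc) (some a)
      = some (Gfold p F i k a) := by
  intro k
  induction k with
  | zero => intro i a; simp [Gfold]
  | succ k ih =>
    intro i a
    rw [List.range'_succ]
    simp only [List.foldl_cons, Gfold]
    by_cases hp : p i <;> simp [hp, ih]

lemma G_eq_omin_H (p : Nat → Prop) [DecidablePred p] (F : Nat → Int) :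
    ∀ (k i : Nat) (a : Int), Gfold p F i k a = omin (Hsel p F i k) a := by
  intro k
  induction k with
  | zero => intro i a; simp [Gfold, Hsel, omin]
  | succ k ih =>
    intro i a
    simp only [Gfold, Hsel]
    by_cases hp : p i
    · simp only [hp, if_pos]
      rw [ih]
      cases h : Hsel p F (i+1) k <;>
        simp [omin, min_comm, min_left_comm]
    · simp only [hp, if_neg, not_false_iff, ih]

lemma Hsel_congr (p q : Nat → Prop) [DecidablePred p] [DecidablePred q] (F F' : Nat → Int) :
    ∀ (k i : Nat), (∀ j, i ≤ j → j < i + k → (p j ↔ q j)) →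
      (∀ j, i < j → j ≤ i + k → F j = F' j) →
      Hsel p F i k = Hsel q F' i k := by
  intro k
  induction k with
  | zero => intro i _ _; rfl
  | succ k ih =>
    intro i hp hF
    have hrest : Hsel p F (i+1) k = Hsel q F' (i+1) k := by
      apply ih
      · intro j h1 h2; exact hp j (by omega) (by omega)
      · intro j h1 h2; exact hF j (by omega) (by omega)
    have hpi : p i ↔ q i := hp i (by omega) (by omega)
    have hFi : F (i+1) = F' (i+1) := hF (i+1) (by omega) (by omega)
    simp only [Hsel, hrest, hpi, hFi]

lemma dpTable_ne_nil (t : List Char) : dpTable t ≠ [] := by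
  cases t <;> simp [dpTable]

lemma dpTable_drop (cs : List Char) (i : Nat) (h : i < cs.length) :
    dpTable (cs.drop i) = dpAt cs i :: dpTable (cs.drop (i+1)) := by
  have hd : cs.drop i = cs[i] :: cs.drop (i+1) := List.drop_eq_getElem_cons h
  conv_lhs => rw [hd, dpTable]
  conv_rhs => rw [dpAt, hd, dpTable]
  simp

lemma Hsel_eq_selMin (cs : List Char) (c0 : Char) :
    ∀ (k i : Nat), i + k = cs.length →
      Hsel (fun e => (some c0 : Option Char) = cs[e]?) (dpAt cs) i k
        = (selMin c0 (cs.drop i) (dpTable (cs.drop (i+1)))).map (fun m => 1 + m) := by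
  intro k
  induction k with
  | zero =>
    intro i hi
    have : cs.drop i = [] := List.drop_eq_nil_of_le (by omega)
    rw [this]
    simp [Hsel, selMin]
  | succ k ih =>
    intro i hi
    have hilt : i < cs.length := by omega
    have hd : cs.drop i = cs[i] :: cs.drop (i+1) := List.drop_eq_getElem_cons hilt
    have hget : cs[i]? = some cs[i] := List.getElem?_eq_getElem hilt
    have hih := ih (i+1) (by omega)
    have h12 : i + 1 + 1 = i + 2 := rfl
    rw [h12] at hih
    -- decompose dpTable (cs.drop (i+1)) — when the suffix is empty selMin ignores it
    rcases Nat.lt_or_ge (i+1) cs.length with hlt | hge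
    · have hd2 : dpTable (cs.drop (i+1)) = dpAt cs (i+1) :: dpTable (cs.drop (i+2)) :=
        dpTable_drop cs (i+1) hlt
      rw [hd, hd2]
      simp only [Hsel, selMin, hget]
      by_cases hc : cs[i] = c0
      · rw [if_pos (by rw [hc]), if_pos hc, hih]
        cases hsel : selMin c0 (cs.drop (i+1)) (dpTable (cs.drop (i+2))) <;>
          simp [omin]
      · rw [if_neg (by intro hcon; exact hc (by injection hcon with h'; exact h'.symm)),
            if_neg hc, hih]
    · -- i+1 = cs.length: the suffix after position i is empty
      have hlen : i + 1 = cs.length := by omega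
      have hnil : cs.drop (i+1) = [] := List.drop_eq_nil_of_le (by omega)
      have hk0 : k = 0 := by omega
      subst hk0
      rw [hd, hnil]
      simp only [Hsel, dpTable, selMin, hget]
      have hdp1 : dpAt cs (i+1) = 0 := by rw [dpAt, hnil]; rfl
      by_cases hc : cs[i] = c0
      · rw [if_pos (by rw [hc]), if_pos hc]
        simp [omin, hdp1]
      · rw [if_neg (by intro hcon; exact hc (by injection hcon with h'; exact h'.symm)),
            if_neg hc]
        rfl

lemma omin_map_add_one (r : Option Int) (d : Int) :
    omin (r.map (fun m => 1 + m)) (1 + d) = 1 + omin r d := by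
  cases r with
  | none => simp [omin]
  | some m =>
    simp only [Option.map_some, omin, Option.elim]
    rw [min_def, min_def]
    split_ifs <;> omega

-- A's memoized recursion computes the dp values of the suffix table
lemma dfsA_eq_dpAt (cs : List Char) :
    ∀ (fuel start : Nat), cs.length - start ≤ fuel →
      dfsA cs cs.length start = dpAt cs start := by
  intro fuel
  induction fuel with
  | zero =>
    intro start hle
    have hge : cs.length ≤ start := by omega
    rw [dfsA]
    rcases Nat.eq_or_lt_of_le hge with heq | hlt
    · rw [if_pos heq.symm, dpAt, List.drop_eq_nil_of_le (by omega)]; rfl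
    · rw [if_neg (by omega)]
      have : cs.length - start = 0 := by omega
      rw [this, dpAt, List.drop_eq_nil_of_le (by omega)]
      rfl
  | succ fuel ih =>
    intro start hle
    rcases Nat.lt_or_ge start cs.length with hlt | hge
    · -- main case
      rw [dfsA, if_neg (by omega)]
      rw [List.foldl_attach (l := List.range' start (cs.length - start))
        (f := fun (acc : Option Int) e =>
          if e = start ∨ cs[start]? = cs[e]? then
            some (acc.elim (1 + dfsA cs cs.length (e + 1))
              (fun m => min m (1 + dfsA cs cs.length (e + 1))))
          else acc) (b := none)]
      have hsplit : cs.length - start = (cs.length - (start+1)) + 1 := by omega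
      rw [hsplit, List.range'_succ, List.foldl_cons]
      rw [if_pos (Or.inl rfl)]
      simp only [Option.elim_none]
      rw [foldl_range'_G (fun e => e = start ∨ cs[start]? = cs[e]?) (fun j => dfsA cs cs.length j)]
      rw [G_eq_omin_H]
      have hget : cs[start]? = some cs[start] := List.getElem?_eq_getElem hlt
      have hcongr :
          Hsel (fun e => e = start ∨ cs[start]? = cs[e]?) (fun j => dfsA cs cs.length j)
              (start+1) (cs.length - (start+1))
            = Hsel (fun e => (some cs[start] : Option Char) = cs[e]?) (dpAt cs)
              (start+1) (cs.length - (start+1)) := by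
        apply Hsel_congr
        · intro j h1 h2
          rw [hget]
          constructor
          · rintro (h | h)
            · exfalso; omega
            · exact h
          · intro h; exact Or.inr h
        · intro j h1 h2
          exact ih j (by omega)
      rw [hcongr, Hsel_eq_selMin cs cs[start] (cs.length - (start+1)) (start+1) (by omega)]
      rw [ih (start+1) (by omega)]
      rw [omin_map_add_one]
      simp only [Option.getD_some]
      -- right-hand side
      have hd : cs.drop start = cs[start] :: cs.drop (start+1) := List.drop_eq_getElem_cons hlt
      conv_rhs => rw [dpAt, hd, dpTable]
      simp only [List.headD_cons]
      have htail : (dpTable (cs.drop (start+1))).tail = dpTable (cs.drop (start+2)) ∨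
          cs.drop (start+1) = [] := by
        rcases Nat.lt_or_ge (start+1) cs.length with h2 | h2
        · exact Or.inl (by rw [dpTable_drop cs (start+1) h2]; rfl)
        · exact Or.inr (List.drop_eq_nil_of_le (by omega))
      have hdp1 : (dpTable (cs.drop (start+1))).headD 0 = dpAt cs (start+1) := rfl
      rcases htail with htail | htail
      · rw [htail, hdp1]
      · simp [selMin, omin, dpAt, htail, dpTable]
    · -- start ≥ length with positive fuel: same as the zero-fuel computation
      rw [dfsA]
      rcases Nat.eq_or_lt_of_le hge with heq | hlt
      · rw [if_pos heq.symm, dpAt, List.drop_eq_nil_of_le (by omega)]; rfl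
      · rw [if_neg (by omega)]
        have : cs.length - start = 0 := by omega
        rw [this, dpAt, List.drop_eq_nil_of_le (by omega)]
        rfl

-- B's fold invariant: dp component = head of the suffix table, dict = per-character minima
lemma altFold_inv (t : List Char) :
    (t.reverse.foldl
        (fun (st : PySem.Dict Char Int × Int) c =>
          let b := min (st.1.getD c st.2) st.2
          (st.1.insert c b, 1 + b))
        (PySem.Dict.empty, 0)).2 = (dpTable t).headD 0
    ∧ ∀ c : Char,
        (t.reverse.foldl
          (fun (st : PySem.Dict Char Int × Int) c =>
            let b := min (st.1.getD c st.2) st.2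
            (st.1.insert c b, 1 + b))
          (PySem.Dict.empty, 0)).1.get? c = selMin c t (dpTable t).tail := by
  induction t with
  | nil =>
    refine ⟨rfl, ?_⟩
    intro c
    simp [selMin, PySem.Dict.get?_empty]
  | cons x t ih =>
    obtain ⟨ihdp, ihget⟩ := ih
    rw [List.reverse_cons, List.foldl_append] at *
    simp only [List.foldl_cons, List.foldl_nil]
    set st := (t.reverse.foldl
      (fun (st : PySem.Dict Char Int × Int) c =>
        let b := min (st.1.getD c st.2) st.2
        (st.1.insert c b, 1 + b))
      (PySem.Dict.empty, 0)) with hst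
    have hb : min (st.1.getD x st.2) st.2
        = omin (selMin x t (dpTable t).tail) ((dpTable t).headD 0) := by
      rw [PySem.Dict.getD_eq_get?_getD, ihget x, ihdp]
      cases h : selMin x t (dpTable t).tail <;> simp [omin]
    constructor
    · show 1 + min (st.1.getD x st.2) st.2 = (dpTable (x :: t)).headD 0
      rw [hb]; rfl
    · intro c
      show (st.1.insert x (min (st.1.getD x st.2) st.2)).get? c = _
      simp only [PySem.Dict.get?_insert]
      have htbl : dpTable t = (dpTable t).headD 0 :: (dpTable t).tail := by
        rcases h : dpTable t with _ | ⟨v, vs⟩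
        · exact absurd h (dpTable_ne_nil t)
        · rfl
      conv_rhs => rw [show (dpTable (x :: t)).tail = dpTable t from rfl, htbl]
      simp only [selMin]
      by_cases hc : c = x
      · rw [if_pos hc, if_pos (by rw [hc]), hb, hc]
      · rw [if_neg hc, if_neg (fun h => hc h.symm), ihget c]

-- ===== VERDICT (by name: the statement is the Claim_ definition above) =====
theorem min_partitions_spec : Claim_equal_min_partitions := by
  intro s _
  unfold Spec_min_partitions min_partitions min_partitions_alt
  rw [dfsA_eq_dpAt s.toList s.toList.length 0 (by omega)]
  rw [(altFold_inv s.toList).1]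
  rfl
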